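-- pv_equiv track=rewrite | github.com/Silas-Asamoah/stormlog | examples/cli/benchmark_harness.py | _run_workload
-- ===== SOURCE A (Python) =====
-- def _run_workload(iterations: int, allocation_kb: int) -> int:
--     """Run a deterministic CPU workload with allocation churn."""
--     checksum = 0
--     block_bytes = max(1, allocation_kb) * 1024
--
--     for step in range(max(1, iterations)):
--         payload = bytearray(block_bytes)
--         marker = (step * 17) % 251
--         for offset in range(0, len(payload), 4096):
--             payload[offset] = marker
--             checksum += payload[offset]
--         checksum ^= len(payload)
--
--     return checksum
-- ===== SOURCE B (Python) =====
-- def _run_workload(iterations: int, allocation_kb: int) -> int: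
--     """Same checksum without allocation: the inner loop writes `marker` at
--     ceil(block_bytes/4096) offsets, so each step adds marker * touches; the
--     marker itself follows the recurrence marker := marker + 17 (wrapping at
--     251), so no multiplication/mod per step either."""
--     block_bytes = max(1, allocation_kb) * 1024
--     touches = -(-block_bytes // 4096)
--     checksum = 0
--     marker = 0
--     n = max(1, iterations)
--     while n > 0:
--         checksum = (checksum + marker * touches) ^ block_bytes
--         marker += 17
--         if marker >= 251:
--             marker -= 251
--         n -= 1
--     return checksum
-- ===== Notes on version B (the rewrite author's own statement) =====
-- stated objective: faster
-- what changed: Drops the per-step bytearray and the inner offset loop (each step contributes marker * ceil(block_bytes/4096)) and replaces the range/mod marker computation by an incremental wrap-around counter in a single while loop.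
import Mathlib
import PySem

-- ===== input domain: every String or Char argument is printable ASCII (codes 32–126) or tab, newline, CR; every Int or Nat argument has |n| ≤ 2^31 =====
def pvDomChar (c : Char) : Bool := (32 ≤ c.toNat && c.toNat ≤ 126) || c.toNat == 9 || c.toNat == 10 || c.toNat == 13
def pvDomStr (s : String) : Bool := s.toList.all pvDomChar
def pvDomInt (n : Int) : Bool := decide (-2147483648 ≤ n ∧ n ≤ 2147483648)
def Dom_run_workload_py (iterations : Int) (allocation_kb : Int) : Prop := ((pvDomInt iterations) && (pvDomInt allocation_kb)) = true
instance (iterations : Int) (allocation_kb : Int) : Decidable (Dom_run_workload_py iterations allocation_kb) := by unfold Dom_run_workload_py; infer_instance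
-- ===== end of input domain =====

-- B drops the per-step bytearray and inner offset loop (each step contributes
-- marker * ceil(block_bytes/4096)) and tracks the marker incrementally with a
-- wrap-around counter in a single while loop (objective: faster, O(iterations)).

-- ===== PORT A =====
-- The bytearray is all zeros except payload[offset] = marker just before it is read,
-- so 'checksum += payload[offset]' is 'checksum += marker'; len(payload) = block_bytes.
-- This is the only bytearray modelling; the loop structure is A's, step for step.
def run_workload_py (iterations : Int) (allocation_kb : Int) : Int :=
  let block_bytes : Int := max 1 allocation_kb * 1024
  (PySem.List.pyRange 0 (max 1 iterations) 1).foldl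
    (fun checksum step =>
      let marker := PySem.Int.mod (step * 17) 251
      let checksum :=
        (PySem.List.pyRange 0 block_bytes 4096).foldl
          (fun c _offset => c + marker) checksum
      PySem.Int.bxor checksum block_bytes)
    0

-- ===== PORT B =====
-- B's while loop: decreasing counter n, incremental marker with explicit wrap.
def pvGoB (block_bytes touches : Int) : Nat → Int → Int → Int
  | 0, _, checksum => checksum
  | n + 1, marker, checksum =>
      pvGoB block_bytes touches n
        (if marker + 17 ≥ 251 then marker + 17 - 251 else marker + 17)
        (PySem.Int.bxor (checksum + marker * touches) block_bytes)

def run_workload_py_alt (iterations : Int) (allocation_kb : Int) : Int :=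
  let block_bytes : Int := max 1 allocation_kb * 1024
  -- touches = -(-block_bytes // 4096)  (ceiling division, as in Source B)
  let touches : Int := -(PySem.Int.floordiv (-block_bytes) 4096)
  pvGoB block_bytes touches (max 1 iterations).toNat 0 0

-- ===== PRECONDITION & SPEC =====
def Spec_run_workload_py (iterations : Int) (allocation_kb : Int) (out : Int) : Prop := out = run_workload_py_alt iterations allocation_kb
instance (iterations : Int) (allocation_kb : Int) (out : Int) : Decidable (Spec_run_workload_py iterations allocation_kb out) := by unfold Spec_run_workload_py; infer_instance

-- ===== CLAIM =====
def Claim_equal_run_workload_py : Prop := ∀ (iterations : Int) (allocation_kb : Int), Dom_run_workload_py iterations allocation_kb → Spec_run_workload_py iterations allocation_kb (run_workload_py iterations allocation_kb)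

-- ===== LEMMAS AND PROOFS =====

-- folding '+ m' over a list adds m once per element
theorem foldl_add_const (m : Int) (l : List Int) (c : Int) :
    l.foldl (fun acc _ => acc + m) c = c + m * l.length := by
  induction l generalizing c with
  | nil => simp
  | cons x xs ih => simp [List.foldl, ih]; ring

-- the inner offset loop runs ceil(bb/4096) times
theorem inner_len (bb : Int) (hbb : 0 < bb) :
    ((PySem.List.pyRange 0 bb 4096).length : Int) = -(PySem.Int.floordiv (-bb) 4096) := by
  rw [PySem.List.pyRange_of_pos 0 bb (by norm_num)]
  simp only [List.length_map, List.length_range]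
  rw [if_pos hbb]
  rw [PySem.Int.floordiv_eq_ediv_of_pos (by norm_num : (0:Int) < 4096)]
  rw [Int.toNat_of_nonneg (Int.ediv_nonneg (by omega) (by norm_num))]
  omega

-- folding A's per-step update over range(a, a+n) equals B's loop started at marker (a*17)%251
theorem fold_eq_goB (bb t : Int) :
    ∀ (n : Nat) (a c : Int), 0 ≤ a →
      (PySem.List.pyRange a (a + n) 1).foldl
          (fun ch step => PySem.Int.bxor (ch + PySem.Int.mod (step * 17) 251 * t) bb) c
        = pvGoB bb t n (PySem.Int.mod (a * 17) 251) c := by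
  intro n
  induction n with
  | zero =>
      intro a c _
      rw [PySem.List.pyRange_one_eq_nil (by simp)]
      rfl
  | succ n ih =>
      intro a c ha
      rw [PySem.List.pyRange_one_cons (by push_cast; omega)]
      simp only [List.foldl]
      have hstep : (a : Int) + (n + 1 : Nat) = (a + 1) + n := by push_cast; ring
      rw [hstep, ih (a + 1) _ (by omega)]
      have hm : PySem.Int.mod ((a + 1) * 17) 251
          = (if PySem.Int.mod (a * 17) 251 + 17 ≥ 251
             then PySem.Int.mod (a * 17) 251 + 17 - 251
             else PySem.Int.mod (a * 17) 251 + 17) := by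
        rw [PySem.Int.mod_eq_emod_of_pos (by norm_num), PySem.Int.mod_eq_emod_of_pos (by norm_num)]
        split_ifs <;> omega
      rw [hm]
      rfl

-- ===== VERDICT =====
theorem run_workload_py_spec : Claim_equal_run_workload_py := by
  intro iterations allocation_kb _
  show run_workload_py iterations allocation_kb = run_workload_py_alt iterations allocation_kb
  unfold run_workload_py run_workload_py_alt
  simp only []
  have hbb : (0:Int) < max 1 allocation_kb * 1024 := by
    have : (1:Int) ≤ max 1 allocation_kb := le_max_left _ _
    nlinarith
  set bb : Int := max 1 allocation_kb * 1024 with hbbdef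
  set t : Int := -(PySem.Int.floordiv (-bb) 4096) with htdef
  have hN : (1:Int) ≤ max 1 iterations := le_max_left _ _
  calc (PySem.List.pyRange 0 (max 1 iterations) 1).foldl
          (fun checksum step =>
            let marker := PySem.Int.mod (step * 17) 251
            let checksum := (PySem.List.pyRange 0 bb 4096).foldl
                (fun c _offset => c + marker) checksum
            PySem.Int.bxor checksum bb) 0
      = (PySem.List.pyRange 0 (max 1 iterations) 1).foldl
          (fun ch step => PySem.Int.bxor (ch + PySem.Int.mod (step * 17) 251 * t) bb) 0 := by
        congr 1
        funext c step
        simp only []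
        rw [foldl_add_const, inner_len bb hbb]
    _ = pvGoB bb t (max 1 iterations).toNat 0 0 := by
        have h0 : (0:Int) + ((max 1 iterations).toNat : Int) = max 1 iterations := by omega
        rw [← h0, fold_eq_goB bb t (max 1 iterations).toNat 0 0 le_rfl]
        norm_num [PySem.Int.mod]
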